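-- pv_equiv track=rewrite | github.com/SedunovSSS/acmp.ru-solutions | 271.py | check
-- ===== SOURCE A (Python) =====
-- def check(n):
--     prev = 0
--     curr = 1
--     fibs = [curr]
--     while curr < n:
--         next = prev + curr
--         prev = curr
--         curr = next
--         fibs.append(curr)
--
--     return [1, fibs.index(n)+1] if n in fibs else [0]
-- ===== SOURCE B (Python) =====
-- def check(n):
--     if n < 1:
--         return [0]
--
--     def fib_pair(k):
--         # fast doubling: returns (F(k), F(k+1))
--         if k == 0:
--             return (0, 1)
--         a, b = fib_pair(k // 2)
--         c = a * (2 * b - a)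
--         d = a * a + b * b
--         return (d, c + d) if k % 2 == 1 else (c, d)
--
--     def fib(k):
--         return fib_pair(k)[0]
--
--     hi = 1
--     while fib(hi) < n:
--         hi *= 2
--     lo = 1
--     while lo < hi:
--         mid = (lo + hi) // 2
--         if fib(mid) < n:
--             lo = mid + 1
--         else:
--             hi = mid
--     return [1, lo] if fib(lo) == n else [0]
-- ===== Notes on version B (the rewrite author's own statement) =====
-- stated objective: alternative
-- what changed: B abandons A's generate-every-Fibonacci-and-scan-the-list strategy: it evaluates F(k) directly by recursive fast doubling and locates the least index m with F(m) >= n by exponential plus binary search, then compares F(m) with n.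
import Mathlib
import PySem

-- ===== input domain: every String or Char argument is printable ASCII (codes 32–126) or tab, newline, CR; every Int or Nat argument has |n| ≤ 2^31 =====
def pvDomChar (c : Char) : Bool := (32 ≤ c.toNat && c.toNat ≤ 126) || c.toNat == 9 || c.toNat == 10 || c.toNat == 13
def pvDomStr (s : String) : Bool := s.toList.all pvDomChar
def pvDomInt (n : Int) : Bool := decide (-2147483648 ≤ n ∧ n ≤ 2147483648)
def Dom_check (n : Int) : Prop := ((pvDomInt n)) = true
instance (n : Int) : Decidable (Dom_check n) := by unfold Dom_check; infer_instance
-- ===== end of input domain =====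

-- B replaces A's generate-all-Fibonacci-numbers-then-scan (`in` + `.index`) by a fast-doubling
-- Fibonacci evaluator with an exponential + binary search for the least index m with F(m) ≥ n.

-- ===== PORT A =====
-- A's while-loop, with fuel to make it total; on exhaustion it returns the same
-- post-loop expression computed from the current state (the chosen fuel always
-- suffices, as the proofs below establish).
def checkLoopA (n : Int) : Nat → Int → Int → List Int → List Int
  | 0, _, _, fibs =>
      if n ∈ fibs then [1, ((PySem.List.index? fibs n).getD 0 : Int) + 1] else [0]
  | fuel + 1, prev, curr, fibs =>
      if curr < n then
        checkLoopA n fuel curr (prev + curr) (fibs ++ [prev + curr])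
      else
        if n ∈ fibs then [1, ((PySem.List.index? fibs n).getD 0 : Int) + 1] else [0]

def check (n : Int) : List Int :=
  checkLoopA n (n.toNat + 2) 0 1 [1]

-- ===== PORT B =====
-- fast doubling: fibPair k = (F(k), F(k+1)), transliterating Source B's fib_pair
def fibPair : Nat → Int × Int
  | 0 => (0, 1)
  | k + 1 =>
      let p := fibPair ((k + 1) / 2)
      let a := p.1
      let b := p.2
      let c := a * (2 * b - a)
      let d := a * a + b * b
      if (k + 1) % 2 = 1 then (d, c + d) else (c, d)
decreasing_by exact Nat.div_lt_self (Nat.succ_pos k) one_lt_two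

def fibB (k : Nat) : Int := (fibPair k).1

-- Source B's `while fib(hi) < n: hi *= 2`, with fuel
def expLoop (n : Int) : Nat → Nat → Nat
  | 0, hi => hi
  | fuel + 1, hi => if fibB hi < n then expLoop n fuel (hi * 2) else hi

-- Source B's binary-search while loop, with fuel
def binLoop (n : Int) : Nat → Nat → Nat → Nat
  | 0, lo, _ => lo
  | fuel + 1, lo, hi =>
      if lo < hi then
        let mid := (lo + hi) / 2
        if fibB mid < n then binLoop n fuel (mid + 1) hi else binLoop n fuel lo mid
      else lo

def check_alt (n : Int) : List Int :=
  if n < 1 then [0]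
  else
    let hi := expLoop n (n.toNat + 2) 1
    let lo := binLoop n hi 1 hi
    if fibB lo = n then [1, (lo : Int)] else [0]

-- ===== PRECONDITION & SPEC =====
def Spec_check (n : Int) (out : List Int) : Prop := out = check_alt n
instance (n : Int) (out : List Int) : Decidable (Spec_check n out) := by unfold Spec_check; infer_instance

-- ===== CLAIM (what is proved, stated in full; the proofs are below) =====
def Claim_equal_check : Prop := ∀ (n : Int), Dom_check n → Spec_check n (check n)

-- ===== LEMMAS AND PROOFS =====

-- reference Fibonacci function used only in the proofs
def fibI (k : Nat) : Int := (Nat.fib k : Int)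

lemma fibI_mono {a b : Nat} (h : a ≤ b) : fibI a ≤ fibI b := by
  unfold fibI; exact_mod_cast Nat.fib_mono h

lemma fib_lower (k : Nat) : (k : Int) + 1 ≤ fibI (k + 2) := by
  unfold fibI
  have : k + 1 ≤ Nat.fib (k + 2) := by
    induction k with
    | zero => simp [Nat.fib]
    | succ k ih =>
        have h1 : 1 ≤ Nat.fib (k + 1) := Nat.fib_pos.2 (Nat.succ_pos k)
        have h2 : Nat.fib (k + 1 + 2) = Nat.fib (k + 1) + Nat.fib (k + 1 + 1) := Nat.fib_add_two
        have h3 : Nat.fib (k + 1 + 1) = Nat.fib (k + 2) := by norm_num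
        omega
  exact_mod_cast this

-- fast doubling is correct
lemma fibPair_eq (k : Nat) : fibPair k = (fibI k, fibI (k + 1)) := by
  induction k using Nat.strong_induction_on with
  | _ k ih =>
    match k with
    | 0 => simp [fibPair, fibI]
    | k + 1 =>
      have hq : (k + 1) / 2 < k + 1 := Nat.div_lt_self (Nat.succ_pos k) one_lt_two
      rw [fibPair]
      rw [ih _ hq]
      set q := (k + 1) / 2 with hqdef
      have hle : Nat.fib q ≤ 2 * Nat.fib (q + 1) := by
        have h := Nat.fib_mono (Nat.le_succ q)
        rw [Nat.succ_eq_add_one] at h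
        omega
      have heven : fibI q * (2 * fibI (q + 1) - fibI q) = fibI (2 * q) := by
        unfold fibI
        rw [Nat.fib_two_mul]
        push_cast [hle]
        ring
      have hodd : fibI q * fibI q + fibI (q + 1) * fibI (q + 1) = fibI (2 * q + 1) := by
        unfold fibI
        rw [Nat.fib_two_mul_add_one]
        push_cast
        ring
      have h2 : fibI (2 * q) + fibI (2 * q + 1) = fibI (2 * q + 1 + 1) := by
        unfold fibI; rw [show 2 * q + 1 + 1 = (2 * q) + 2 from rfl, Nat.fib_add_two]; push_cast; ring
      by_cases hp : (k + 1) % 2 = 1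
      · have hk : k + 1 = 2 * q + 1 := by omega
        rw [hk, if_pos (by omega : (2 * q + 1) % 2 = 1), Prod.mk.injEq]
        constructor
        · linarith [hodd]
        · rw [← h2, ← heven, ← hodd]
      · have hk : k + 1 = 2 * q := by omega
        rw [hk, if_neg (by omega : ¬ (2 * q) % 2 = 1), Prod.mk.injEq]
        constructor
        · linarith [heven]
        · linarith [hodd]
lemma fibB_eq (k : Nat) : fibB k = fibI k := by
  unfold fibB; rw [fibPair_eq]

-- least index with fibI m ≥ n is unique
lemma least_unique {n : Int} {m₁ m₂ : Nat}
    (h1 : n ≤ fibI m₁ ∧ ∀ i < m₁, fibI i < n)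
    (h2 : n ≤ fibI m₂ ∧ ∀ i < m₂, fibI i < n) : m₁ = m₂ := by
  rcases Nat.lt_trichotomy m₁ m₂ with h | h | h
  · exact absurd (h2.2 m₁ h) (not_lt.2 h1.1)
  · exact h
  · exact absurd (h1.2 m₂ h) (not_lt.2 h2.1)

-- the exponential search returns hi with fib hi ≥ n (and hi ≥ 1)
lemma expLoop_spec (n : Int) : ∀ (fuel hi : Nat), 1 ≤ hi → n ≤ fibI (hi * 2 ^ fuel) →
    1 ≤ expLoop n fuel hi ∧ n ≤ fibI (expLoop n fuel hi) := by
  intro fuel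
  induction fuel with
  | zero =>
      intro hi h1 h2
      simp only [pow_zero, mul_one] at h2
      by_cases hc : fibB hi < n
      · rw [fibB_eq] at hc; exact absurd h2 (not_le.2 hc)
      · exact ⟨h1, by simpa [expLoop, hc, fibB_eq] using h2⟩
  | succ fuel ih =>
      intro hi h1 h2
      by_cases hc : fibB hi < n
      · have := ih (hi * 2) (by omega) (by rw [show hi * 2 * 2 ^ fuel = hi * 2 ^ (fuel + 1) by ring]; exact h2)
        simpa [expLoop, hc] using this
      · have hge : n ≤ fibI hi := by rw [← fibB_eq]; exact not_lt.1 hc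
        exact ⟨by simpa [expLoop, hc] using h1, by simpa [expLoop, hc] using hge⟩

-- the binary search returns the least m with fib m ≥ n
lemma binLoop_spec (n : Int) : ∀ (fuel lo hi : Nat), 1 ≤ lo → lo ≤ hi → hi - lo ≤ fuel →
    (∀ m < lo, fibI m < n) → n ≤ fibI hi →
    n ≤ fibI (binLoop n fuel lo hi) ∧ ∀ m < binLoop n fuel lo hi, fibI m < n := by
  intro fuel
  induction fuel with
  | zero =>
      intro lo hi h1 h2 h3 h4 h5
      have : lo = hi := by omega
      subst this
      exact ⟨h5, h4⟩
  | succ fuel ih =>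
      intro lo hi h1 h2 h3 h4 h5
      by_cases hlt : lo < hi
      · simp only [binLoop, if_pos hlt]
        set mid := (lo + hi) / 2 with hmid
        have hm1 : lo ≤ mid := by omega
        have hm2 : mid < hi := by omega
        by_cases hc : fibB mid < n
        · rw [fibB_eq] at hc
          simp only [fibB_eq, if_pos hc]
          refine ih (mid + 1) hi (by omega) (by omega) (by omega) ?_ h5
          intro m hm
          calc fibI m ≤ fibI mid := fibI_mono (by omega)
            _ < n := hc
        · rw [fibB_eq] at hc
          simp only [fibB_eq, if_neg (not_lt.2 (not_lt.1 hc))]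
          exact ih lo mid h1 hm1 (by omega) h4 (not_lt.1 hc)
      · have : lo = hi := by omega
        subst this
        simpa [binLoop, hlt] using ⟨h5, h4⟩

-- A's loop rewritten with a running counter (proof-side reference, old bridge)
def refLoop (n : Int) : Nat → Int → Int → Int → List Int
  | 0, _, curr, idx => if curr = n then [1, idx] else [0]
  | fuel + 1, prev, curr, idx =>
      if curr < n then refLoop n fuel curr (prev + curr) (idx + 1)
      else if curr = n then [1, idx] else [0]

lemma exit_eq (n curr idx : Int) (ys : List Int)
    (hlt : ∀ y ∈ ys, y < n) (hidx : idx = (ys.length : Int) + 1) :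
    (if n ∈ ys ++ [curr] then [1, ((PySem.List.index? (ys ++ [curr]) n).getD 0 : Int) + 1] else [0])
      = (if curr = n then [1, idx] else [0]) := by
  by_cases hc : curr = n
  · subst hc
    have hnot : curr ∉ ys := fun h => lt_irrefl curr (hlt curr h)
    have hmem : curr ∈ ys ++ [curr] := by simp
    rw [if_pos hmem, PySem.List.index?_append_singleton_self ys curr hnot]
    simp [hidx]
  · have hnm : n ∉ ys ++ [curr] := by
      intro h
      rcases List.mem_append.1 h with h | h
      · exact lt_irrefl n (hlt n h)
      · exact hc ((List.mem_singleton.1 h).symm)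
    rw [if_neg hnm]
    simp [hc]

lemma loop_eq (n : Int) (fuel : Nat) : ∀ (prev curr idx : Int) (ys : List Int),
    (∀ y ∈ ys, y < n) → idx = (ys.length : Int) + 1 →
    checkLoopA n fuel prev curr (ys ++ [curr]) = refLoop n fuel prev curr idx := by
  induction fuel with
  | zero =>
      intro prev curr idx ys hlt hidx
      simpa [checkLoopA, refLoop] using exit_eq n curr idx ys hlt hidx
  | succ fuel ih =>
      intro prev curr idx ys hlt hidx
      by_cases hc : curr < n
      · have hlt' : ∀ y ∈ ys ++ [curr], y < n := by
          intro y hy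
          rcases List.mem_append.1 hy with h | h
          · exact hlt y h
          · rw [List.mem_singleton.1 h]; exact hc
        have hidx' : idx + 1 = (((ys ++ [curr]).length : Int)) + 1 := by
          simp [hidx]
        have := ih curr (prev + curr) (idx + 1) (ys ++ [curr]) hlt' hidx'
        simpa [checkLoopA, refLoop, hc, List.append_assoc] using this
      · simp only [checkLoopA, refLoop, if_neg hc]
        simpa using exit_eq n curr idx ys hlt hidx

-- characterization of the counter loop: it reaches the least m with fib m ≥ n
lemma refLoop_spec (n : Int) : ∀ (fuel j : Nat), n.toNat + 1 ≤ fuel + j →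
    (∀ i ≤ j, fibI i < n) →
    ∃ m : Nat, (n ≤ fibI m ∧ ∀ i < m, fibI i < n) ∧
      refLoop n fuel (fibI j) (fibI (j + 1)) ((j : Int) + 1)
        = (if fibI m = n then [1, (m : Int)] else [0]) := by
  intro fuel
  induction fuel with
  | zero =>
      intro j hf hlt
      by_cases hc : fibI (j + 1) < n
      · exfalso
        have h1 : (j : Int) + 1 ≤ fibI (j + 2) := fib_lower j
        have h2 : fibI (j + 2) ≤ fibI (j + 1 + 1) := le_of_eq rfl
        have h3 : n ≤ (j : Int) + 1 := by
          have : n ≤ (n.toNat : Int) := Int.self_le_toNat n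
          omega
        have := fibI_mono (show j + 1 ≤ j + 2 by omega)
        -- fib (j+1) < n ≤ j+1 ≤ fib (j+2), but j ≥ n.toNat+1 so fib (j+1) ≥ n
        have h4 : n ≤ fibI (j + 1) := by
          have hj : n.toNat + 1 ≤ j := by omega
          calc n ≤ (n.toNat : Int) := Int.self_le_toNat n
            _ ≤ (n.toNat : Int) + 1 := by omega
            _ ≤ fibI (n.toNat + 2) := fib_lower n.toNat
            _ ≤ fibI (j + 1) := fibI_mono (by omega)
        exact absurd h4 (not_le.2 hc)
      · refine ⟨j + 1, ⟨not_lt.1 hc, ?_⟩, ?_⟩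
        · intro i hi; exact hlt i (by omega)
        · simp only [refLoop]
          push_cast
          rfl
  | succ fuel ih =>
      intro j hf hlt
      by_cases hc : fibI (j + 1) < n
      · have hlt' : ∀ i ≤ j + 1, fibI i < n := by
          intro i hi
          rcases Nat.lt_or_ge i (j + 1) with h | h
          · exact hlt i (by omega)
          · have : i = j + 1 := by omega
            subst this; exact hc
        obtain ⟨m, hm, heq⟩ := ih (j + 1) (by omega) hlt'
        refine ⟨m, hm, ?_⟩
        rw [refLoop]
        rw [if_pos hc]
        have hfib : fibI j + fibI (j + 1) = fibI (j + 1 + 1) := by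
          unfold fibI; rw [show j + 1 + 1 = j + 2 from rfl, Nat.fib_add_two]; push_cast; ring
        rw [show (fibI j + fibI (j + 1)) = fibI (j + 1 + 1) from hfib,
            show ((j : Int) + 1 + 1) = (((j + 1 : Nat) : Int) + 1) by push_cast; ring]
        exact heq
      · refine ⟨j + 1, ⟨not_lt.1 hc, fun i hi => hlt i (by omega)⟩, ?_⟩
        simp only [refLoop, if_neg hc]
        push_cast
        rfl

-- ===== VERDICT (by name: the statement is the Claim_ definition above) =====
theorem check_spec : Claim_equal_check := by
  intro n _
  unfold Spec_check
  by_cases hn : n < 1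
  · have hne : n ≠ 1 := by omega
    simp [check, check_alt, checkLoopA, hn, not_lt.2 (show n ≤ 1 by omega), hne]
  · rw [not_lt] at hn
    -- A's side: loop_eq then refLoop_spec
    have hA : check n = refLoop n (n.toNat + 2) 0 1 1 := by
      have := loop_eq n (n.toNat + 2) 0 1 1 [] (by simp) (by simp)
      simpa [check] using this
    obtain ⟨mA, hmA, heqA⟩ := refLoop_spec n (n.toNat + 2) 0 (by omega) (by
      intro i hi
      have : i = 0 := by omega
      subst this
      simpa [fibI] using hn)
    have heqA' : check n = (if fibI mA = n then [1, (mA : Int)] else [0]) := by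
      rw [hA]
      simpa [fibI] using heqA
    -- B's side
    have hB : ¬ n < 1 := not_lt.2 hn
    have hpow : n ≤ fibI (1 * 2 ^ (n.toNat + 2)) := by
      have h1 : n.toNat + 2 ≤ 2 ^ (n.toNat + 2) := by
        have := Nat.lt_two_pow_self (n := n.toNat + 2)
        omega
      calc n ≤ (n.toNat : Int) := Int.self_le_toNat n
        _ ≤ (n.toNat : Int) + 1 := by omega
        _ ≤ fibI (n.toNat + 2) := fib_lower n.toNat
        _ ≤ fibI (1 * 2 ^ (n.toNat + 2)) := fibI_mono (by omega)
    obtain ⟨hhi1, hhi2⟩ := expLoop_spec n (n.toNat + 2) 1 le_rfl hpow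
    set hi := expLoop n (n.toNat + 2) 1 with hhi
    obtain ⟨hlo1, hlo2⟩ := binLoop_spec n hi 1 hi le_rfl hhi1 (by omega)
      (by intro m hm; interval_cases m; simpa [fibI] using hn) hhi2
    set lo := binLoop n hi 1 hi with hlodef
    have hBval : check_alt n = (if fibI lo = n then [1, (lo : Int)] else [0]) := by
      simp only [check_alt, if_neg hB, fibB_eq]
      rfl
    have hmm : mA = lo := least_unique hmA ⟨hlo1, hlo2⟩
    rw [heqA', hBval, hmm]
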